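-- pv_equiv track=rewrite | github.com/jschnab/leetcode | strings/equalize_frequency.py | eq_freq
-- ===== SOURCE A (Python) =====
-- from collections import Counter
--
-- def eq_freq(S):
--     count = Counter(S)
--     for char in S:
--         count[char] -= 1
--         if len(set(count.values()) - {0}) == 1:
--             return True
--         count[char] += 1
--     return False
-- ===== SOURCE B (Python) =====
-- from collections import Counter
--
-- def eq_freq(S):
--     counts = Counter(S)
--     fof = Counter(counts.values())
--     freqs = sorted(fof)
--     if len(freqs) == 1:
--         [f] = freqs
--         return (f == 1 and fof[f] >= 2) or (f >= 2 and fof[f] == 1)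
--     if len(freqs) == 2:
--         f, g = freqs
--         return (f == 1 and fof[f] == 1) or (g == f + 1 and fof[g] == 1)
--     return False
-- ===== Notes on version B (the rewrite author's own statement) =====
-- stated objective: faster
-- what changed: A tries deleting each character of S and rebuilds the set of nonzero counts per try; B builds the frequency-of-frequencies table once and answers by a constant-size case analysis on the (at most two) distinct frequency values.
import Mathlib
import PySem

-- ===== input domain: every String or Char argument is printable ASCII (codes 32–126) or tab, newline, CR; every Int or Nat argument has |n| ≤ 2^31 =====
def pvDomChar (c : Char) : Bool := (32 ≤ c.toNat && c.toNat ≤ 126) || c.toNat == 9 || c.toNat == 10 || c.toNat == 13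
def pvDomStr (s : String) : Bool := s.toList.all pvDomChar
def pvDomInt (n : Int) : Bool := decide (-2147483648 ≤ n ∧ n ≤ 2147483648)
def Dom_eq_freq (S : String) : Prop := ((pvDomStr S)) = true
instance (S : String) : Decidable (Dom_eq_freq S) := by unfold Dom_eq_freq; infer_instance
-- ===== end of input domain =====

-- B replaces A's try-every-deletion scan (which rebuilds the nonzero-value set once per
-- character of S) by one case analysis on the frequency-of-frequencies table.

-- ===== PORT A =====
-- the 'for char in S' loop of A: decrement count[char], test len(set(count.values()) - {0}) == 1,
-- restore count[char] and continue
def pvLoopA (count : PySem.Dict Char Int) : List Char → Bool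
  | [] => false
  | char :: rest =>
    let count1 := count.modify char 0 (· - 1)
    if PySem.Set.len ((PySem.Set.ofList count1.values).diff [0]) == 1 then true
    else pvLoopA (count1.modify char 0 (· + 1)) rest

def eq_freq (S : String) : Bool :=
  pvLoopA (PySem.Dict.counter S.toList) S.toList

-- ===== PORT B =====
def eq_freq_alt (S : String) : Bool :=
  let counts := PySem.Dict.counter S.toList
  let fof := PySem.Dict.counter counts.values
  let freqs := PySem.List.sorted fof.keys id
  match freqs with
  | [f] => (decide (f = 1) && decide (2 ≤ fof.getD f 0)) || (decide (2 ≤ f) && decide (fof.getD f 0 = 1))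
  | [f, g] => (decide (f = 1) && decide (fof.getD f 0 = 1)) || (decide (g = f + 1) && decide (fof.getD g 0 = 1))
  | _ => false

-- ===== PRECONDITION & SPEC =====
def Spec_eq_freq (S : String) (out : Bool) : Prop := out = eq_freq_alt S
instance (S : String) (out : Bool) : Decidable (Spec_eq_freq S out) := by unfold Spec_eq_freq; infer_instance

-- ===== CLAIM (what is proved, stated in full; the proofs are below) =====
def Claim_equal_eq_freq : Prop := ∀ (S : String), Dom_eq_freq S → Spec_eq_freq S (eq_freq S)

-- ===== LEMMAS AND PROOFS =====

-- abbreviations used only by the proofs: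
-- pvCnt L k = the count of k in L; pvDel L c = the value list of A's counter after the
-- decrement of key c; pvChk d c = A's loop test for character c
def pvCnt (L : List Char) (k : Char) : Int := (L.count k : Int)

def pvDel (L : List Char) (c : Char) : List Int :=
  (PySem.Set.ofList L).map (fun k => if k = c then pvCnt L c - 1 else pvCnt L k)

def pvChk (d : PySem.Dict Char Int) (c : Char) : Bool :=
  PySem.Set.len ((PySem.Set.ofList ((d.modify c 0 (· - 1)).values)).diff [0]) == 1


lemma pv_insert_insert {κ ν : Type} [BEq κ] [LawfulBEq κ] (d : PySem.Dict κ ν) (c : κ) (a b : ν) :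
    (d.insert c a).insert c b = d.insert c b := by
  apply PySem.Dict.ext
  by_cases h : d.contains c = true
  · have h2 : (d.insert c a).contains c = true := by
      rw [PySem.Dict.contains_insert]; simp
    rw [PySem.Dict.items_insert_of_contains _ _ h2, PySem.Dict.items_insert_of_contains _ _ h,
        PySem.Dict.items_insert_of_contains _ _ h, List.map_map]
    apply List.map_congr_left
    intro p _
    by_cases hp : p.1 = c <;> simp [hp]
  · have h' : d.contains c = false := by simpa using h
    have h2 : (d.insert c a).contains c = true := by
      rw [PySem.Dict.contains_insert]; simp
    rw [PySem.Dict.items_insert_of_contains _ _ h2, PySem.Dict.items_insert_of_not_contains _ _ h',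
        PySem.Dict.items_insert_of_not_contains _ _ h', List.map_append]
    have h'' : ∀ (a : κ) (b : ν), (a, b) ∈ d.items → ¬ a = c := by
      simpa [PySem.Dict.contains] using h'
    have hne : ∀ p ∈ d.items, (p.1 == c) = false := by
      intro p hp
      have := h'' p.1 p.2 hp
      simpa using this
    have hmap : List.map (fun p => if (p.1 == c) = true then (c, b) else p) d.items = d.items := by
      calc List.map (fun p => if (p.1 == c) = true then (c, b) else p) d.items
          = List.map id d.items := List.map_congr_left (by intro p hp; simp [hne p hp])
        _ = d.items := List.map_id _
    rw [hmap]; simp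

lemma pv_insert_getD_self {κ ν : Type} [BEq κ] [LawfulBEq κ] (d : PySem.Dict κ ν) (c : κ) (v0 : ν)
    (hc : d.contains c = true) (hn : d.keys.Nodup) : d.insert c (d.getD c v0) = d := by
  apply PySem.Dict.ext
  rw [PySem.Dict.items_insert_of_contains _ _ hc]
  have h : ∀ p ∈ d.items, (if (p.1 == c) = true then (c, d.getD c v0) else p) = p := by
    intro p hp
    by_cases hpc : p.1 = c
    · have heq : p = (c, p.2) := by rw [← hpc]
      have hmem : (c, p.2) ∈ d.items := heq ▸ hp
      have := PySem.Dict.getD_of_mem_items d hmem hn v0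
      simp only [hpc, beq_self_eq_true, if_true, this]
      exact heq.symm
    · simp [hpc]
  calc List.map _ d.items = List.map id d.items := List.map_congr_left h
    _ = d.items := List.map_id _

lemma pv_restore (d : PySem.Dict Char Int) (c : Char)
    (hc : d.contains c = true) (hn : d.keys.Nodup) :
    (d.modify c 0 (· - 1)).modify c 0 (· + 1) = d := by
  simp only [PySem.Dict.modify, PySem.Dict.getD_insert_self]
  rw [show d.getD c 0 - 1 + 1 = d.getD c 0 by ring, pv_insert_insert]
  exact pv_insert_getD_self d c 0 hc hn

lemma pvLoopA_any (l : List Char) (d : PySem.Dict Char Int)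
    (hn : d.keys.Nodup) (hc : ∀ c ∈ l, d.contains c = true) :
    pvLoopA d l = l.any (pvChk d) := by
  induction l with
  | nil => rfl
  | cons c rest ih =>
    have hrest := pv_restore d c (hc c (by simp)) hn
    show (if pvChk d c = true then true else pvLoopA ((d.modify c 0 (· - 1)).modify c 0 (· + 1)) rest) = _
    rw [hrest, ih (fun x hx => hc x (by simp [hx]))]
    cases h : pvChk d c <;> simp [h]

-- a nodup list whose members are all a, containing a, is [a]
lemma pv_nodup_singleton {α : Type} (l : List α) (a : α)
    (hn : l.Nodup) (ha : a ∈ l) (hall : ∀ b ∈ l, b = a) : l = [a] := by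
  cases l with
  | nil => simp at ha
  | cons x t =>
    have hx : x = a := hall x (by simp)
    subst hx
    have ht : t = [] := by
      rw [List.eq_nil_iff_forall_not_mem]
      intro y hy
      have : y = x := hall y (by simp [hy])
      subst this
      exact (List.nodup_cons.mp hn).1 hy
    simp [ht]

lemma pv_len_one (l : List Int) :
    PySem.Set.len ((PySem.Set.ofList l).diff [0]) = 1 ↔
      ∃ a, a ≠ 0 ∧ a ∈ l ∧ ∀ b ∈ l, b ≠ 0 → b = a := by
  have hmemf : ∀ x : Int, x ∈ (PySem.Set.ofList l).diff [0] ↔ (x ∈ l ∧ x ≠ 0) := by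
    intro x
    simp [PySem.Set.diff, List.mem_filter, PySem.Set.mem_ofList]
  have hnd : ((PySem.Set.ofList l).diff [0]).Nodup :=
    List.Nodup.filter _ (PySem.Set.nodup_ofList l)
  constructor
  · intro h
    have : ((PySem.Set.ofList l).diff [0]).length = 1 := by
      simpa [PySem.Set.len] using h
    obtain ⟨a, ha⟩ := List.length_eq_one_iff.mp this
    refine ⟨a, ?_, ?_, ?_⟩
    · exact ((hmemf a).mp (by simp [ha])).2
    · exact ((hmemf a).mp (by simp [ha])).1
    · intro b hb hb0
      have : b ∈ (PySem.Set.ofList l).diff [0] := (hmemf b).mpr ⟨hb, hb0⟩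
      rw [ha] at this; simpa using this
  · rintro ⟨a, ha0, hal, huniq⟩
    have : (PySem.Set.ofList l).diff [0] = [a] := by
      apply pv_nodup_singleton _ _ hnd ((hmemf a).mpr ⟨hal, ha0⟩)
      intro b hb
      obtain ⟨hbl, hb0⟩ := (hmemf b).mp hb
      exact huniq b hbl hb0
    simp [PySem.Set.len, this]

lemma pv_values_counter (L : List Char) :
    (PySem.Dict.counter L).values = (PySem.Set.ofList L).map (pvCnt L) := by
  unfold PySem.Dict.values
  rw [PySem.Dict.items_counter, List.map_map]
  rfl

lemma pv_values_modify (L : List Char) (c : Char) (hc : c ∈ L) :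
    ((PySem.Dict.counter L).modify c 0 (· - 1)).values = pvDel L c := by
  have hcon : (PySem.Dict.counter L).contains c = true := by
    rw [PySem.Dict.contains_counter]; simpa using hc
  simp only [PySem.Dict.modify, PySem.Dict.getD_counter]
  unfold PySem.Dict.values
  rw [PySem.Dict.items_insert_of_contains _ _ hcon, PySem.Dict.items_counter,
      List.map_map, List.map_map]
  unfold pvDel
  apply List.map_congr_left
  intro k _
  by_cases hkc : k = c <;> simp [hkc, pvCnt]

lemma pv_chk_iff (L : List Char) (c : Char) (hc : c ∈ L) :
    pvChk (PySem.Dict.counter L) c = true ↔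
      ∃ a, a ≠ 0 ∧ a ∈ pvDel L c ∧ ∀ b ∈ pvDel L c, b ≠ 0 → b = a := by
  unfold pvChk
  rw [pv_values_modify L c hc, beq_iff_eq]
  exact pv_len_one _

lemma pv_del_mem_of (L : List Char) (c k : Char) (hk : k ∈ PySem.Set.ofList L) (hkc : k ≠ c) :
    pvCnt L k ∈ pvDel L c := by
  unfold pvDel
  have := List.mem_map_of_mem (f := fun k => if k = c then pvCnt L c - 1 else pvCnt L k) hk
  simpa [hkc] using this

lemma pv_del_mem_self (L : List Char) (c : Char) (hc : c ∈ PySem.Set.ofList L) :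
    pvCnt L c - 1 ∈ pvDel L c := by
  unfold pvDel
  have := List.mem_map_of_mem (f := fun k => if k = c then pvCnt L c - 1 else pvCnt L k) hc
  simpa using this

lemma pv_del_cases (L : List Char) (c : Char) (b : Int) (hb : b ∈ pvDel L c) :
    b = pvCnt L c - 1 ∨ ∃ k, k ∈ PySem.Set.ofList L ∧ k ≠ c ∧ b = pvCnt L k := by
  unfold pvDel at hb
  obtain ⟨k, hk, he⟩ := List.mem_map.mp hb
  by_cases hkc : k = c
  · left; rw [← he, if_pos hkc]
  · right; exact ⟨k, hk, hkc, by rw [← he, if_neg hkc]⟩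

lemma pv_count_eq (L : List Char) (f : Int) :
    ((PySem.Set.ofList L).map (pvCnt L)).count f =
      ((PySem.Set.ofList L).filter (fun k => pvCnt L k == f)).length := by
  rw [List.count_eq_countP, List.countP_map, List.countP_eq_length_filter]
  rfl

lemma pv_two_le_length {α : Type} {l : List α} {x y : α}
    (hx : x ∈ l) (hy : y ∈ l) (hxy : x ≠ y) : 2 ≤ l.length := by
  rcases l with _ | ⟨a, _ | ⟨b, t⟩⟩
  · simp at hx
  · simp at hx hy; exact absurd (hx.trans hy.symm) hxy
  · simp

lemma pv_exists_two {α : Type} {l : List α} (hn : l.Nodup) (h2 : 2 ≤ l.length) :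
    ∃ x y, x ∈ l ∧ y ∈ l ∧ x ≠ y := by
  rcases l with _ | ⟨a, _ | ⟨b, t⟩⟩
  · simp at h2
  · simp at h2
  · refine ⟨a, b, by simp, by simp, ?_⟩
    intro h
    exact (List.nodup_cons.mp hn).1 (h ▸ List.mem_cons_self ..)

lemma pv_alt_eq (S : String) :
    eq_freq_alt S =
      (match PySem.List.sorted (PySem.Set.ofList ((PySem.Dict.counter S.toList).values)) id with
       | [f] => (decide (f = 1) && decide (2 ≤ ((((PySem.Dict.counter S.toList).values).count f : Int)))) ||
                (decide (2 ≤ f) && decide (((((PySem.Dict.counter S.toList).values).count f : Int)) = 1))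
       | [f, g] => (decide (f = 1) && decide (((((PySem.Dict.counter S.toList).values).count f : Int)) = 1)) ||
                   (decide (g = f + 1) && decide (((((PySem.Dict.counter S.toList).values).count g : Int)) = 1))
       | _ => false) := by
  simp only [eq_freq_alt, PySem.Dict.keys_counter]
  cases hq : PySem.List.sorted (PySem.Set.ofList ((PySem.Dict.counter S.toList).values)) id with
  | nil => rfl
  | cons f t =>
    cases t with
    | nil => simp [PySem.Dict.getD_counter]
    | cons g t2 =>
      cases t2 with
      | nil => simp [PySem.Dict.getD_counter]
      | cons h t3 => rfl

lemma pv_main (S : String) : eq_freq S = eq_freq_alt S := by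
  unfold eq_freq
  rw [pvLoopA_any S.toList _ (PySem.Dict.nodup_keys_counter _)
        (fun c hc => by rw [PySem.Dict.contains_counter]; simpa using hc)]
  rw [pv_alt_eq, pv_values_counter]
  set L := S.toList with hLdef
  set K := PySem.Set.ofList L with hKdef
  set vs := K.map (pvCnt L) with hvsdef
  have hKnd : K.Nodup := PySem.Set.nodup_ofList L
  have hmemK : ∀ k : Char, k ∈ K ↔ k ∈ L := fun k => PySem.Set.mem_ofList L k
  have hvmem : ∀ k ∈ K, pvCnt L k ∈ vs := fun k hk => List.mem_map_of_mem hk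
  have hkey : ∀ x ∈ vs, ∃ k, k ∈ K ∧ pvCnt L k = x := by
    intro x hx
    obtain ⟨k, hk, he⟩ := List.mem_map.mp hx
    exact ⟨k, hk, he⟩
  have hpos : ∀ x ∈ vs, 1 ≤ x := by
    intro x hx
    obtain ⟨k, hk, he⟩ := hkey x hx
    have hkL : k ∈ L := (hmemK k).mp hk
    have h1 : 0 < L.count k := List.count_pos_iff.mpr hkL
    rw [← he]; unfold pvCnt; exact_mod_cast h1
  set F := PySem.List.sorted (PySem.Set.ofList vs) id with hFdef
  have hperm : F.Perm (PySem.Set.ofList vs) := PySem.List.sorted_perm _ _ _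
  have hndF : F.Nodup := hperm.nodup_iff.mpr (PySem.Set.nodup_ofList vs)
  have hmemF : ∀ x : Int, x ∈ F ↔ x ∈ vs := fun x => hperm.mem_iff.trans (PySem.Set.mem_ofList vs x)
  have hpw := PySem.List.sorted_pairwise (PySem.Set.ofList vs) (id : Int → Int)
  rw [← hFdef] at hpw
  rw [Bool.eq_iff_iff, List.any_eq_true]
  cases hF : F with
  | nil =>
    simp only [Bool.false_eq_true, iff_false]
    rintro ⟨c, hcL, -⟩
    have h1 : pvCnt L c ∈ vs := hvmem c ((hmemK c).mpr hcL)
    have h2 : pvCnt L c ∈ F := (hmemF _).mpr h1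
    rw [hF] at h2
    simp at h2
  | cons f t =>
    cases t with
    | nil =>
      have hallf : ∀ x ∈ vs, x = f := by
        intro x hx
        have hxF := (hmemF x).mpr hx
        rw [hF] at hxF; simpa using hxF
      have hfvs : f ∈ vs := (hmemF f).mp (by rw [hF]; simp)
      have hf1 : 1 ≤ f := hpos f hfvs
      have hcfl : vs.count f = K.length := by
        have h1 : vs.count f = vs.length :=
          List.count_eq_length.mpr (fun b hb => (hallf b hb).symm)
        have h2 : vs.length = K.length := by rw [hvsdef, List.length_map]
        omega
      simp only [Bool.or_eq_true, Bool.and_eq_true, decide_eq_true_eq]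
      constructor
      · rintro ⟨c, hcL, hchk⟩
        have hcK : c ∈ K := (hmemK c).mpr hcL
        obtain ⟨a, ha0, hamem, huniq⟩ := (pv_chk_iff L c hcL).mp hchk
        have hcf : pvCnt L c = f := hallf _ (hvmem c hcK)
        by_cases h2 : ∃ k, k ∈ K ∧ k ≠ c
        · obtain ⟨k, hkK, hkc⟩ := h2
          have hkf : pvCnt L k = f := hallf _ (hvmem k hkK)
          have hfdel : f ∈ pvDel L c := hkf ▸ pv_del_mem_of L c k hkK hkc
          have haf : f = a := huniq f hfdel (by omega)
          have hdel0 : f - 1 ∈ pvDel L c := by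
            have := pv_del_mem_self L c hcK
            rwa [hcf] at this
          have hfe1 : f = 1 := by
            by_contra hne
            have := huniq _ hdel0 (by omega)
            omega
          left
          refine ⟨hfe1, ?_⟩
          have h2l : 2 ≤ K.length := pv_two_le_length hkK hcK hkc
          have h2c : 2 ≤ vs.count f := by omega
          exact_mod_cast h2c
        · push Not at h2
          have hKc : K = [c] := pv_nodup_singleton K c hKnd hcK (fun b hb => h2 b hb)
          have hdel : pvDel L c = [pvCnt L c - 1] := by unfold pvDel; rw [← hKdef, hKc]; simp
          rw [hdel, hcf] at hamem
          simp at hamem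
          right
          constructor
          · omega
          · have h1c : vs.count f = 1 := by rw [hcfl, hKc]; rfl
            exact_mod_cast h1c
      · rintro (⟨hfe1, hge2⟩ | ⟨hf2, hc1⟩)
        · have h2l : 2 ≤ K.length := by
            have h2c : (2:Int) ≤ (vs.count f : Int) := hge2
            have h2c' : 2 ≤ vs.count f := by exact_mod_cast h2c
            omega
          obtain ⟨x, y, hxK, hyK, hxy⟩ := pv_exists_two hKnd h2l
          have hxL : x ∈ L := (hmemK x).mp hxK
          refine ⟨x, hxL, ?_⟩
          rw [pv_chk_iff L x hxL]
          refine ⟨1, one_ne_zero, ?_, ?_⟩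
          · have hm := pv_del_mem_of L x y hyK (Ne.symm hxy)
            have hyf : pvCnt L y = f := hallf _ (hvmem y hyK)
            rwa [hyf, hfe1] at hm
          · intro b hb hb0
            rcases pv_del_cases L x b hb with hh | ⟨k, hkK, hkx, he⟩
            · have hxf : pvCnt L x = f := hallf _ (hvmem x hxK)
              rw [hxf, hfe1] at hh; omega
            · have hkf : pvCnt L k = f := hallf _ (hvmem k hkK)
              rw [he, hkf, hfe1]
        · have h1l : K.length = 1 := by
            have h1c : vs.count f = 1 := by exact_mod_cast hc1
            omega
          obtain ⟨c, hKc⟩ := List.length_eq_one_iff.mp h1l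
          have hcK : c ∈ K := by rw [hKc]; simp
          have hcL : c ∈ L := (hmemK c).mp hcK
          refine ⟨c, hcL, ?_⟩
          rw [pv_chk_iff L c hcL]
          have hcf : pvCnt L c = f := hallf _ (hvmem c hcK)
          have hdel : pvDel L c = [pvCnt L c - 1] := by unfold pvDel; rw [← hKdef, hKc]; simp
          refine ⟨f - 1, by omega, ?_, ?_⟩
          · rw [hdel, hcf]; simp
          · intro b hb hb0
            rw [hdel, hcf] at hb
            simpa using hb

    | cons g t2 =>
      cases t2 with
      | nil =>
          have hfvs : f ∈ vs := (hmemF f).mp (by rw [hF]; simp)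
          have hgvs : g ∈ vs := (hmemF g).mp (by rw [hF]; simp)
          have hfg : f < g := by
            have hle : f ≤ g := by
              rw [hF] at hpw
              have := List.pairwise_cons.mp hpw
              simpa using this.1 g (by simp)
            have hne : f ≠ g := by
              rw [hF] at hndF
              intro he
              exact (List.nodup_cons.mp hndF).1 (by simp [he])
            omega
          have hf1 : 1 ≤ f := hpos f hfvs
          have hg2 : 2 ≤ g := by omega
          have hall2 : ∀ x ∈ vs, x = f ∨ x = g := by
            intro x hx
            have hxF := (hmemF x).mpr hx
            rw [hF] at hxF; simpa using hxF
          have hcfe : vs.count f = (K.filter (fun k => pvCnt L k == f)).length := pv_count_eq L f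
          have hcge : vs.count g = (K.filter (fun k => pvCnt L k == g)).length := pv_count_eq L g
          simp only [Bool.or_eq_true, Bool.and_eq_true, decide_eq_true_eq]
          constructor
          · rintro ⟨c, hcL, hchk⟩
            have hcK : c ∈ K := (hmemK c).mpr hcL
            obtain ⟨a, ha0, hamem, huniq⟩ := (pv_chk_iff L c hcL).mp hchk
            rcases hall2 _ (hvmem c hcK) with hvf | hvg
            · obtain ⟨kg, hkgK, hkgg⟩ := hkey g hgvs
              have hkgc : kg ≠ c := by intro he; rw [he, hvf] at hkgg; omega
              have hgdel : g ∈ pvDel L c := hkgg ▸ pv_del_mem_of L c kg hkgK hkgc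
              have hag : g = a := huniq g hgdel (by omega)
              have hf1del : f - 1 ∈ pvDel L c := by
                have := pv_del_mem_self L c hcK; rwa [hvf] at this
              have hfe1 : f = 1 := by
                by_contra hne
                have := huniq _ hf1del (by omega)
                omega
              left
              refine ⟨hfe1, ?_⟩
              have hflt : K.filter (fun k => pvCnt L k == f) = [c] := by
                apply pv_nodup_singleton _ _ (hKnd.filter _)
                · exact List.mem_filter.mpr ⟨hcK, by simp [hvf]⟩
                · intro b hb
                  obtain ⟨hbK, hbf⟩ := List.mem_filter.mp hb
                  have hbf' : pvCnt L b = f := by simpa using hbf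
                  by_contra hbc
                  have hfd : f ∈ pvDel L c := hbf' ▸ pv_del_mem_of L c b hbK hbc
                  have := huniq f hfd (by omega)
                  omega
              have h1 : vs.count f = 1 := by rw [hcfe, hflt]; rfl
              exact_mod_cast h1
            · obtain ⟨kf, hkfK, hkff⟩ := hkey f hfvs
              have hkfc : kf ≠ c := by intro he; rw [he, hvg] at hkff; omega
              have hfdel : f ∈ pvDel L c := hkff ▸ pv_del_mem_of L c kf hkfK hkfc
              have haf : f = a := huniq f hfdel (by omega)
              have hg1del : g - 1 ∈ pvDel L c := by
                have := pv_del_mem_self L c hcK; rwa [hvg] at this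
              have hgf1 : g = f + 1 := by
                have := huniq _ hg1del (by omega)
                omega
              right
              refine ⟨hgf1, ?_⟩
              have hglt : K.filter (fun k => pvCnt L k == g) = [c] := by
                apply pv_nodup_singleton _ _ (hKnd.filter _)
                · exact List.mem_filter.mpr ⟨hcK, by simp [hvg]⟩
                · intro b hb
                  obtain ⟨hbK, hbg⟩ := List.mem_filter.mp hb
                  have hbg' : pvCnt L b = g := by simpa using hbg
                  by_contra hbc
                  have hgd : g ∈ pvDel L c := hbg' ▸ pv_del_mem_of L c b hbK hbc
                  have := huniq g hgd (by omega)
                  omega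
              have h1 : vs.count g = 1 := by rw [hcge, hglt]; rfl
              exact_mod_cast h1
          · rintro (⟨hfe1, hcf1⟩ | ⟨hgf1, hcg1⟩)
            · have hcf1' : (K.filter (fun k => pvCnt L k == f)).length = 1 := by
                have h1 : vs.count f = 1 := by exact_mod_cast hcf1
                omega
              obtain ⟨c, hce⟩ := List.length_eq_one_iff.mp hcf1'
              have hcmem : c ∈ K.filter (fun k => pvCnt L k == f) := by rw [hce]; simp
              have hcK : c ∈ K := (List.mem_filter.mp hcmem).1
              have hcf : pvCnt L c = f := by
                have := (List.mem_filter.mp hcmem).2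
                simpa using this
              have hcL : c ∈ L := (hmemK c).mp hcK
              obtain ⟨kg, hkgK, hkgg⟩ := hkey g hgvs
              have hkgc : kg ≠ c := by intro he; rw [he, hcf] at hkgg; omega
              refine ⟨c, hcL, ?_⟩
              rw [pv_chk_iff L c hcL]
              refine ⟨g, by omega, hkgg ▸ pv_del_mem_of L c kg hkgK hkgc, ?_⟩
              intro b hb hb0
              rcases pv_del_cases L c b hb with hh | ⟨k, hkK, hkc, he⟩
              · rw [hcf, hfe1] at hh; omega
              · rcases hall2 _ (hvmem k hkK) with hkf | hkg2
                · exfalso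
                  have hkm : k ∈ K.filter (fun k => pvCnt L k == f) :=
                    List.mem_filter.mpr ⟨hkK, by simp [hkf]⟩
                  rw [hce] at hkm
                  simp at hkm
                  exact hkc hkm
                · rw [he, hkg2]
            · have hcg1' : (K.filter (fun k => pvCnt L k == g)).length = 1 := by
                have h1 : vs.count g = 1 := by exact_mod_cast hcg1
                omega
              obtain ⟨c, hce⟩ := List.length_eq_one_iff.mp hcg1'
              have hcmem : c ∈ K.filter (fun k => pvCnt L k == g) := by rw [hce]; simp
              have hcK : c ∈ K := (List.mem_filter.mp hcmem).1
              have hcg : pvCnt L c = g := by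
                have := (List.mem_filter.mp hcmem).2
                simpa using this
              have hcL : c ∈ L := (hmemK c).mp hcK
              obtain ⟨kf, hkfK, hkff⟩ := hkey f hfvs
              have hkfc : kf ≠ c := by intro he; rw [he, hcg] at hkff; omega
              refine ⟨c, hcL, ?_⟩
              rw [pv_chk_iff L c hcL]
              refine ⟨f, by omega, hkff ▸ pv_del_mem_of L c kf hkfK hkfc, ?_⟩
              intro b hb hb0
              rcases pv_del_cases L c b hb with hh | ⟨k, hkK, hkc, he⟩
              · rw [hcg] at hh; omega
              · rcases hall2 _ (hvmem k hkK) with hkf2 | hkg2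
                · rw [he, hkf2]
                · exfalso
                  have hkm : k ∈ K.filter (fun k => pvCnt L k == g) :=
                    List.mem_filter.mpr ⟨hkK, by simp [hkg2]⟩
                  rw [hce] at hkm
                  simp at hkm
                  exact hkc hkm

      | cons h t3 =>
        simp only [Bool.false_eq_true, iff_false]
        rintro ⟨c, hcL, hchk⟩
        have hcK : c ∈ K := (hmemK c).mpr hcL
        obtain ⟨a, ha0, hamem, huniq⟩ := (pv_chk_iff L c hcL).mp hchk
        have hfvs : f ∈ vs := (hmemF f).mp (by rw [hF]; simp)
        have hgvs : g ∈ vs := (hmemF g).mp (by rw [hF]; simp)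
        have hhvs : h ∈ vs := (hmemF h).mp (by rw [hF]; simp)
        have hnd3 : f ≠ g ∧ f ≠ h ∧ g ≠ h := by
          rw [hF] at hndF
          obtain ⟨h1, h2⟩ := List.nodup_cons.mp hndF
          obtain ⟨h3, _⟩ := List.nodup_cons.mp h2
          exact ⟨fun he => h1 (by simp [he]), fun he => h1 (by simp [he]),
            fun he => h3 (by simp [he])⟩
        have key : ∀ x y : Int, x ∈ vs → y ∈ vs → x ≠ y →
            x ≠ pvCnt L c → y ≠ pvCnt L c → False := by
          intro x y hx hy hxy hxc hyc
          obtain ⟨kx, hkxK, hkxv⟩ := hkey x hx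
          obtain ⟨ky, hkyK, hkyv⟩ := hkey y hy
          have hkxc : kx ≠ c := fun he => hxc (by rw [← hkxv, he])
          have hkyc : ky ≠ c := fun he => hyc (by rw [← hkyv, he])
          have hxdel : x ∈ pvDel L c := hkxv ▸ pv_del_mem_of L c kx hkxK hkxc
          have hydel : y ∈ pvDel L c := hkyv ▸ pv_del_mem_of L c ky hkyK hkyc
          have hx1 : 1 ≤ x := hpos x hx
          have hy1 : 1 ≤ y := hpos y hy
          have hxa := huniq x hxdel (by omega)
          have hya := huniq y hydel (by omega)
          omega
        by_cases hvf : pvCnt L c = f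
        · exact key g h hgvs hhvs hnd3.2.2 (by rw [hvf]; exact Ne.symm hnd3.1)
            (by rw [hvf]; exact Ne.symm hnd3.2.1)
        · by_cases hvg : pvCnt L c = g
          · exact key f h hfvs hhvs hnd3.2.1 (by rw [hvg]; exact hnd3.1)
              (by rw [hvg]; exact Ne.symm hnd3.2.2)
          · exact key f g hfvs hgvs hnd3.1 (fun he => hvf he.symm) (fun he => hvg he.symm)


-- ===== VERDICT (by name: the statement is the Claim_ definition above) =====
theorem eq_freq_spec : Claim_equal_eq_freq := by
  intro S _
  show Spec_eq_freq S (eq_freq S)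
  unfold Spec_eq_freq
  exact pv_main S
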